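-- pv_equiv track=rewrite | github.com/judawu/OPC | _DVDA_.py | convert_paths
-- ===== SOURCE A (Python) =====
-- def convert_paths(paths: list[str]) -> list[str]:
--     """
--     Convert full OPC DA paths to short paths by removing the first two segments,
--     keeping the last dot and suffix, and replacing intermediate dots with slashes.
--
--     Args:
--         paths (list[str]): List of full paths, e.g., ['MODULES.AREA_V1.V1-IO.AI1_SCI1.EU0']
--
--     Returns:
--         list[str]: List of converted short paths, e.g., ['V1-IO/AI1_SCI1.EU0']
--     """
--     converted_paths = []
--
--     for path in paths:
--         # Split the path by dots
--         parts = path.strip().split('.')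
--
--         # Check if there are at least 3 parts (to remove first two and keep last)
--         if len(parts) < 3:
--             converted_paths.append(path)  # Return original if invalid
--             continue
--
--         # Remove the first two parts (MODULES and AREA_Vx)
--         remaining_parts = parts[2:]
--
--         # If only one part remains after removal, use it as is
--         if len(remaining_parts) == 1:
--             converted_paths.append(remaining_parts[0])
--             continue
--
--         # Take all but the last part, join with slashes, then append the last part with its dot
--         prefix_and_middle = remaining_parts[:-1]
--         last_part = remaining_parts[-1]
--         short_path = '/'.join(prefix_and_middle) + '.' + last_part
--
--         converted_paths.append(short_path)
--
--     return converted_paths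
-- ===== SOURCE B (Python) =====
-- def _shorten(path):
--     s = path.strip()
--     if s.count('.') < 2:
--         return path
--     i = s.find('.')
--     j = s.find('.', i + 1)
--     tail = s[j + 1:]
--     k = tail.rfind('.')
--     if k == -1:
--         return tail
--     return tail[:k].replace('.', '/') + tail[k:]
--
--
-- def convert_paths(paths: list[str]) -> list[str]:
--     return [_shorten(p) for p in paths]
-- ===== Notes on version B (the rewrite author's own statement) =====
-- stated objective: alternative
-- what changed: B reformats each path directly on the raw string - count the dots, locate the second dot with find, slice off the tail, split off the suffix at the last dot with rfind and replace the remaining dots with slashes - instead of A's building a parts list with split, slicing it and re-joining.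
import Mathlib
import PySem

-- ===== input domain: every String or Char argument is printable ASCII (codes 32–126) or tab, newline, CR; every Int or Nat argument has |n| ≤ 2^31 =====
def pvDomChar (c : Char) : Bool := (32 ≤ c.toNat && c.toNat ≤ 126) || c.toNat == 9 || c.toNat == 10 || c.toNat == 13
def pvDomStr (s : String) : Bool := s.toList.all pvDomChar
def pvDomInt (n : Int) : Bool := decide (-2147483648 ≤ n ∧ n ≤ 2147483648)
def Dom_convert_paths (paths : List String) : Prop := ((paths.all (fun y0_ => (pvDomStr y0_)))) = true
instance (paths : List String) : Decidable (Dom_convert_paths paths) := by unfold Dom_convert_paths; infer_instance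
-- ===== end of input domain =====

-- B reformats each path on the raw string (count/find/rfind/replace and slices) instead of
-- building and slicing a split-parts list; objective: alternative decomposition, same cost.

-- ===== PORT A =====
-- one loop iteration of A: split the stripped path on '.', drop two parts, join with '/'
def convertOneA (path : String) : String :=
  let parts := (PySem.Str.split? (PySem.Str.strip path) ".").getD []
  if parts.length < 3 then path
  else
    let remaining := PySem.List.slice parts (some 2) none
    if remaining.length = 1 then (PySem.List.pyGet? remaining 0).getD ""
    else
      let prefix_and_middle := PySem.List.slice remaining none (some (-1))
      let last_part := (PySem.List.pyGet? remaining (-1)).getD ""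
      PySem.Str.join "/" prefix_and_middle ++ "." ++ last_part

def convert_paths (paths : List String) : List String :=
  paths.foldl (fun acc path => acc ++ [convertOneA path]) []

-- ===== PORT B =====
-- one element of B's comprehension: locate the second dot, cut the tail, keep the last dot
def shortenB (path : String) : String :=
  let s := PySem.Str.strip path
  if PySem.Str.count s "." < 2 then path
  else
    let i := PySem.Str.find s "."
    let j := PySem.Str.findFrom s "." (i + 1)
    let tail := PySem.Str.slice s (some (j + 1)) none
    let k := PySem.Str.rfind tail "."
    if k = -1 then tail
    else PySem.Str.replace (PySem.Str.slice tail none (some k)) "." "/" ++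
           PySem.Str.slice tail (some k) none

def convert_paths_alt (paths : List String) : List String :=
  paths.map shortenB

-- ===== PRECONDITION & SPEC =====
def Spec_convert_paths (paths : List String) (out : List String) : Prop := out = convert_paths_alt paths
instance (paths : List String) (out : List String) : Decidable (Spec_convert_paths paths out) := by unfold Spec_convert_paths; infer_instance

-- ===== CLAIM (what is proved, stated in full; the proofs are below) =====
def Claim_equal_convert_paths : Prop := ∀ (paths : List String), Dom_convert_paths paths → Spec_convert_paths paths (convert_paths paths)

-- ===== LEMMAS AND PROOFS =====

-- reference split of a char list on '.' (Python semantics of s.split('.'))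
def mySplit : List Char → List (List Char)
  | [] => [[]]
  | c :: cs =>
    if c = '.' then [] :: mySplit cs
    else
      match mySplit cs with
      | [] => [[c]]
      | h :: t => (c :: h) :: t

-- reference '.'-join
def myJoin : List (List Char) → List Char
  | [] => []
  | [p] => p
  | p :: ps => p ++ '.' :: myJoin ps

-- reference '/'-join
def myJoinS : List (List Char) → List Char
  | [] => []
  | [p] => p
  | p :: ps => p ++ '/' :: myJoinS ps

-- reference find / rfind of '.'
def myFind : List Char → Int
  | [] => -1
  | c :: cs => if c = '.' then 0 else (if myFind cs = -1 then -1 else myFind cs + 1)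

def myRfind : List Char → Int
  | [] => -1
  | c :: cs => if myRfind cs = -1 then (if c = '.' then 0 else -1) else myRfind cs + 1

def dotSlash (c : Char) : Char := if c = '.' then '/' else c

theorem mySplit_ne_nil (cs : List Char) : mySplit cs ≠ [] := by
  cases cs with
  | nil => simp [mySplit]
  | cons c cs =>
    simp only [mySplit]
    split
    · simp
    · split <;> simp

-- ---- splitOn = mySplit ----
theorem splitOn_go_zero (l cur : List Char) (acc : List (List Char)) :
    PySem.Chars.splitOn.go ['.'] 0 l cur acc = ((cur.reverse ++ l) :: acc).reverse := by
  cases l <;> simp [PySem.Chars.splitOn.go]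

theorem splitOn_go_nil (fuel : Nat) (cur : List Char) (acc : List (List Char)) :
    PySem.Chars.splitOn.go ['.'] (fuel+1) [] cur acc = (cur.reverse :: acc).reverse := by
  simp [PySem.Chars.splitOn.go]

theorem splitOn_go_cons (fuel : Nat) (c : Char) (rest cur : List Char) (acc : List (List Char)) :
    PySem.Chars.splitOn.go ['.'] (fuel+1) (c :: rest) cur acc =
      if c = '.' then PySem.Chars.splitOn.go ['.'] fuel rest [] (cur.reverse :: acc)
      else PySem.Chars.splitOn.go ['.'] fuel rest (c :: cur) acc := by
  by_cases h : c = '.'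
  · simp [PySem.Chars.splitOn.go, List.isPrefixOf, h]
  · simp [PySem.Chars.splitOn.go, List.isPrefixOf, h, Ne.symm h]

theorem splitOn_go_eq (fuel : Nat) :
    ∀ (l cur : List Char) (acc : List (List Char)), l.length ≤ fuel →
    PySem.Chars.splitOn.go ['.'] fuel l cur acc =
      acc.reverse ++ ((cur.reverse ++ (mySplit l).headI) :: (mySplit l).tail) := by
  induction fuel with
  | zero =>
    intro l cur acc h
    have : l = [] := by cases l <;> simp_all
    subst this
    simp [splitOn_go_zero, mySplit]
  | succ n ih =>
    intro l cur acc h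
    cases l with
    | nil => simp [splitOn_go_nil, mySplit]
    | cons c rest =>
      rw [splitOn_go_cons]
      obtain ⟨h0, t0, ht⟩ : ∃ h0 t0, mySplit rest = h0 :: t0 := by
        cases hms : mySplit rest with
        | nil => exact absurd hms (mySplit_ne_nil rest)
        | cons a b => exact ⟨a, b, rfl⟩
      by_cases hc : c = '.'
      · rw [if_pos hc, ih rest [] _ (by simpa using h)]
        simp [mySplit, hc, ht]
      · rw [if_neg hc, ih rest (c :: cur) _ (by simpa using h)]
        simp only [mySplit, if_neg hc]
        simp [ht]

theorem splitOn_eq_mySplit (cs : List Char) :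
    PySem.Chars.splitOn cs ['.'] = mySplit cs := by
  have h := splitOn_go_eq (cs.length + 1) cs [] [] (by omega)
  rw [PySem.Chars.splitOn, h]
  obtain ⟨h0, t0, ht⟩ : ∃ h0 t0, mySplit cs = h0 :: t0 := by
    cases hms : mySplit cs with
    | nil => exact absurd hms (mySplit_ne_nil cs)
    | cons a b => exact ⟨a, b, rfl⟩
  simp [ht]

-- ---- find = myFind ----
theorem myFind_nonneg_or (cs : List Char) : myFind cs = -1 ∨ 0 ≤ myFind cs := by
  induction cs with
  | nil => simp [myFind]
  | cons c cs ih =>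
    by_cases hc : c = '.'
    · simp [myFind, hc]
    · rcases ih with h | h
      · simp [myFind, hc, h]
      · have : myFind cs ≠ -1 := by omega
        simp [myFind, hc, this]; omega

theorem find_go_eq (l : List Char) : ∀ (k : Nat),
    PySem.Chars.find.go ['.'] l k = if myFind l = -1 then -1 else k + myFind l := by
  induction l with
  | nil => intro k; simp [PySem.Chars.find.go, myFind]
  | cons c t ih =>
    intro k
    by_cases h : c = '.'
    · simp [PySem.Chars.find.go, List.isPrefixOf, h, myFind]
    · have step : PySem.Chars.find.go ['.'] (c :: t) k = PySem.Chars.find.go ['.'] t (k+1) := by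
        simp [PySem.Chars.find.go, List.isPrefixOf, h, Ne.symm h]
      rw [step, ih (k+1)]
      simp only [myFind, if_neg h]
      by_cases h2 : myFind t = -1
      · simp [h2]
      · have h4 : 0 ≤ myFind t := by
          rcases myFind_nonneg_or t with h3 | h3
          · exact absurd h3 h2
          · exact h3
        have h5 : ¬ (myFind t + 1 = -1) := by omega
        have h6 : ¬ ((1:Int) + myFind t = -1) := by omega
        simp [h2, h5, h6]
        push_cast
        ring

theorem find_eq_myFind (cs : List Char) : PySem.Chars.find cs ['.'] = myFind cs := by
  rw [PySem.Chars.find, find_go_eq]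
  by_cases h : myFind cs = -1 <;> simp [h]

-- ---- count = List.count '.' ----
theorem count_go_eq (fuel : Nat) : ∀ (l : List Char) (acc : Nat), l.length ≤ fuel →
    PySem.Chars.count.go ['.'] fuel l acc = acc + l.count '.' := by
  induction fuel with
  | zero =>
    intro l acc h
    have : l = [] := by cases l <;> simp_all
    subst this; simp [PySem.Chars.count.go]
  | succ n ih =>
    intro l acc h
    cases l with
    | nil => simp [PySem.Chars.count.go]
    | cons c rest =>
      by_cases hc : c = '.'
      · have step : PySem.Chars.count.go ['.'] (n+1) (c :: rest) acc
            = PySem.Chars.count.go ['.'] n rest (acc + 1) := by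
          simp [PySem.Chars.count.go, List.isPrefixOf, hc]
        rw [step, ih rest (acc+1) (by simpa using h)]
        simp [hc, List.count_cons]
        omega
      · have step : PySem.Chars.count.go ['.'] (n+1) (c :: rest) acc
            = PySem.Chars.count.go ['.'] n rest acc := by
          simp [PySem.Chars.count.go, List.isPrefixOf, hc, Ne.symm hc]
        rw [step, ih rest acc (by simpa using h)]
        simp [List.count_cons, hc]

theorem count_eq_count (cs : List Char) : PySem.Chars.count cs ['.'] = cs.count '.' := by
  rw [PySem.Chars.count]
  simp [count_go_eq cs.length cs 0 (le_refl _)]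

-- ---- replace '.' '/' = map dotSlash ----
theorem replace_go_eq (fuel : Nat) : ∀ (l acc : List Char), l.length ≤ fuel →
    PySem.Chars.replace.go ['.'] ['/'] fuel l acc = acc.reverse ++ l.map dotSlash := by
  induction fuel with
  | zero =>
    intro l acc h
    have : l = [] := by cases l <;> simp_all
    subst this; simp [PySem.Chars.replace.go]
  | succ n ih =>
    intro l acc h
    cases l with
    | nil => simp [PySem.Chars.replace.go]
    | cons c rest =>
      by_cases hc : c = '.'
      · have step : PySem.Chars.replace.go ['.'] ['/'] (n+1) (c :: rest) acc
            = PySem.Chars.replace.go ['.'] ['/'] n rest ('/' :: acc) := by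
          simp [PySem.Chars.replace.go, List.isPrefixOf, hc]
        rw [step, ih rest _ (by simpa using h)]
        simp [dotSlash, hc]
      · have step : PySem.Chars.replace.go ['.'] ['/'] (n+1) (c :: rest) acc
            = PySem.Chars.replace.go ['.'] ['/'] n rest (c :: acc) := by
          simp [PySem.Chars.replace.go, List.isPrefixOf, hc, Ne.symm hc]
        rw [step, ih rest _ (by simpa using h)]
        simp [dotSlash, hc]

theorem replace_eq_map (cs : List Char) :
    PySem.Chars.replace cs ['.'] ['/'] = cs.map dotSlash := by
  rw [PySem.Chars.replace]
  simp [replace_go_eq cs.length cs [] (le_refl _)]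

-- ---- rfind = myRfind ----
theorem myRfind_snoc (xs : List Char) (c : Char) :
    myRfind (xs ++ [c]) = if c = '.' then (xs.length : Int) else myRfind xs := by
  induction xs with
  | nil => by_cases h : c = '.' <;> simp [myRfind, h]
  | cons x xs ih =>
    by_cases h : c = '.'
    · have hge : (0:Int) ≤ (xs.length : Int) := by positivity
      simp only [List.cons_append, myRfind, ih, if_pos h]
      have : ((xs.length : Int)) ≠ -1 := by omega
      simp [this]
    · simp only [List.cons_append, myRfind, ih, if_neg h]

theorem myRfind_nonneg_or (cs : List Char) : myRfind cs = -1 ∨ 0 ≤ myRfind cs := by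
  induction cs with
  | nil => simp [myRfind]
  | cons c cs ih =>
    simp only [myRfind]
    rcases ih with h | h
    · by_cases hc : c = '.' <;> simp [h, hc]
    · have h2 : myRfind cs ≠ -1 := by omega
      rw [if_neg h2]
      right; omega

theorem rfind_go_eq (cs : List Char) : ∀ (j : Nat),
    PySem.Chars.rfind.go cs ['.'] j = myRfind (cs.take (j+1)) := by
  intro j
  induction j with
  | zero =>
    have step : PySem.Chars.rfind.go cs ['.'] 0 = if ['.'].isPrefixOf cs then 0 else -1 := by
      simp [PySem.Chars.rfind.go]
    rw [step]
    cases cs with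
    | nil => simp [List.isPrefixOf, myRfind]
    | cons c t =>
      by_cases h : c = '.'
      · simp [List.isPrefixOf, h, myRfind, List.take_succ_cons]
      · simp [List.isPrefixOf, h, Ne.symm h, myRfind, List.take_succ_cons]
  | succ j ih =>
    have step : PySem.Chars.rfind.go cs ['.'] (j+1) =
        if ['.'].isPrefixOf (cs.drop (j+1)) then ((j:Int)+1) else PySem.Chars.rfind.go cs ['.'] j := by
      simp [PySem.Chars.rfind.go]
    rw [step]
    by_cases hlt : j + 1 < cs.length
    · have hget : cs.drop (j+1) = cs[j+1] :: cs.drop (j+2) := List.drop_eq_getElem_cons hlt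
      have htake : cs.take (j+2) = cs.take (j+1) ++ [cs[j+1]] := by
        rw [show j+2 = (j+1)+1 from rfl, List.take_add_one]
        simp [List.getElem?_eq_getElem hlt]
      rw [htake, myRfind_snoc]
      have hlen : (cs.take (j+1)).length = j + 1 := by simp; omega
      by_cases h : cs[j+1] = '.'
      · simp [hget, List.isPrefixOf, h, hlen]
      · have hpre : (['.'].isPrefixOf (cs.drop (j+1))) = false := by
          rw [hget]; simp [List.isPrefixOf, Ne.symm h]
        rw [hpre, if_neg h]
        simpa using ih
    · have hdrop : cs.drop (j+1) = [] := by
        apply List.drop_eq_nil_of_le; omega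
      have htake2 : cs.take (j+2) = cs := List.take_of_length_le (by omega)
      have htake1 : cs.take (j+1) = cs := List.take_of_length_le (by omega)
      simp [hdrop, List.isPrefixOf, htake1, htake2, ih]

theorem rfind_eq_myRfind (cs : List Char) : PySem.Chars.rfind cs ['.'] = myRfind cs := by
  rw [PySem.Chars.rfind, rfind_go_eq]
  rw [List.take_of_length_le (by omega)]

-- ---- structural facts about mySplit ----
theorem myJoin_mySplit (cs : List Char) : myJoin (mySplit cs) = cs := by
  induction cs with
  | nil => simp [mySplit, myJoin]
  | cons c cs ih =>
    obtain ⟨h0, t0, ht⟩ : ∃ h0 t0, mySplit cs = h0 :: t0 := by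
      cases hms : mySplit cs with
      | nil => exact absurd hms (mySplit_ne_nil cs)
      | cons a b => exact ⟨a, b, rfl⟩
    by_cases hc : c = '.'
    · simp only [mySplit, if_pos hc, ht]
      cases t0 with
      | nil =>
        have h1 : h0 = cs := by rw [ht] at ih; simpa [myJoin] using ih
        simp [myJoin, hc, h1]
      | cons u v =>
        simp only [myJoin]
        rw [ht] at ih
        simp only [myJoin] at ih
        simp [hc, ih]
    · simp only [mySplit, if_neg hc, ht]
      rw [ht] at ih
      cases t0 with
      | nil => simp only [myJoin] at ih ⊢; simp [ih]
      | cons u v =>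
        simp only [myJoin] at ih ⊢
        simp [← ih]

theorem dotFree_mySplit (cs : List Char) : ∀ p ∈ mySplit cs, '.' ∉ p := by
  induction cs with
  | nil => simp [mySplit]
  | cons c cs ih =>
    obtain ⟨h0, t0, ht⟩ : ∃ h0 t0, mySplit cs = h0 :: t0 := by
      cases hms : mySplit cs with
      | nil => exact absurd hms (mySplit_ne_nil cs)
      | cons a b => exact ⟨a, b, rfl⟩
    by_cases hc : c = '.'
    · simp only [mySplit, if_pos hc]
      intro p hp
      rcases List.mem_cons.mp hp with hp | hp
      · simp [hp]
      · exact ih p hp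
    · simp only [mySplit, if_neg hc, ht]
      intro p hp
      rcases List.mem_cons.mp hp with hp | hp
      · subst hp
        intro hmem
        rcases List.mem_cons.mp hmem with hmem | hmem
        · exact hc hmem.symm
        · exact ih h0 (by rw [ht]; exact List.mem_cons_self) hmem
      · exact ih p (by rw [ht]; exact List.mem_cons_of_mem _ hp)

-- ---- join-level characterisations (parts dot-free) ----
theorem count_myJoin (ps : List (List Char)) (hps : ps ≠ [])
    (hfree : ∀ p ∈ ps, '.' ∉ p) : (myJoin ps).count '.' = ps.length - 1 := by
  induction ps with
  | nil => simp at hps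
  | cons p ps ih =>
    cases ps with
    | nil =>
      simp only [myJoin]
      have : '.' ∉ p := hfree p (by simp)
      simp [List.count_eq_zero.2 this]
    | cons q qs =>
      simp only [myJoin]
      rw [List.count_append]
      have h1 : '.' ∉ p := hfree p (by simp)
      rw [List.count_eq_zero.2 h1]
      have h2 := ih (by simp) (fun r hr => hfree r (List.mem_cons_of_mem _ hr))
      simp only [myJoin] at h2
      simp [List.count_cons, h2]

theorem myFind_append_free (p : List Char) (cs : List Char) (hfree : '.' ∉ p) :
    myFind (p ++ cs) = if myFind cs = -1 then -1 else p.length + myFind cs := by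
  induction p with
  | nil => by_cases h : myFind cs = -1 <;> simp [h]
  | cons c p ih =>
    have hc : c ≠ '.' := fun h => hfree (by simp [h])
    have hf : '.' ∉ p := fun h => hfree (by simp [h])
    rw [List.cons_append]
    simp only [myFind, if_neg hc, ih hf]
    by_cases h : myFind cs = -1
    · simp [h]
    · have h2 : (0:Int) ≤ (p.length:Int) := by positivity
      have h3 := myFind_nonneg_or cs
      have h4 : 0 ≤ myFind cs := by
        rcases h3 with h3 | h3
        · exact absurd h3 h
        · exact h3
      have : ¬ ((p.length : Int) + myFind cs = -1) := by omega
      simp [h, this]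
      push_cast; ring

theorem myRfind_append_free (p : List Char) (cs : List Char) (hfree : '.' ∉ p) :
    myRfind (p ++ cs) = if myRfind cs = -1 then -1 else p.length + myRfind cs := by
  induction p with
  | nil => by_cases h : myRfind cs = -1 <;> simp [h]
  | cons c p ih =>
    have hc : c ≠ '.' := fun h => hfree (by simp [h])
    have hf : '.' ∉ p := fun h => hfree (by simp [h])
    rw [List.cons_append]
    simp only [myRfind, ih hf]
    by_cases h : myRfind cs = -1
    · simp [h, hc]
    · have h4 : 0 ≤ myRfind cs := by
        rcases myRfind_nonneg_or cs with h3 | h3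
        · exact absurd h3 h
        · exact h3
      have h2 : (0:Int) ≤ (p.length:Int) := by positivity
      have : ¬ ((p.length : Int) + myRfind cs = -1) := by omega
      simp [h, this]
      push_cast; ring

theorem myJoin_cons_cons (p q : List Char) (ps : List (List Char)) :
    myJoin (p :: q :: ps) = p ++ '.' :: myJoin (q :: ps) := by
  simp [myJoin]

theorem myFind_myJoin (p : List Char) (ps : List (List Char))
    (hfree : ∀ r ∈ p :: ps, '.' ∉ r) :
    myFind (myJoin (p :: ps)) = if ps = [] then -1 else (p.length : Int) := by
  cases ps with
  | nil =>
    have := myFind_append_free p [] (hfree p (by simp))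
    simpa [myJoin, myFind] using this
  | cons q qs =>
    rw [myJoin_cons_cons, myFind_append_free p _ (hfree p (by simp))]
    simp [myFind]

theorem myRfind_myJoin (p : List Char) (ps : List (List Char))
    (hfree : ∀ r ∈ p :: ps, '.' ∉ r) :
    myRfind (myJoin (p :: ps)) =
      if ps = [] then -1 else ((myJoin (p :: ps.dropLast)).length : Int) := by
  induction ps generalizing p with
  | nil =>
    have := myRfind_append_free p [] (hfree p (by simp))
    simpa [myJoin, myRfind] using this
  | cons q qs ih =>
    rw [myJoin_cons_cons, myRfind_append_free p _ (hfree p (by simp))]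
    have inner := ih q (fun r hr => hfree r (List.mem_cons_of_mem _ hr))
    cases qs with
    | nil =>
      simp only [myJoin] at inner ⊢
      simp only [myRfind]
      rw [inner]
      have : '.' ∉ q := hfree q (by simp)
      simp [myJoin]
    | cons u us =>
      simp only [if_neg (by simp : ¬ (u :: us : List (List Char)) = [])] at inner
      simp only [myRfind]
      rw [inner]
      have hnn : (0:Int) ≤ ((myJoin (q :: (u :: us).dropLast)).length : Int) := by positivity
      have h1 : ¬ ((myJoin (q :: (u :: us).dropLast)).length : Int) = -1 := by omega
      have h2 : ¬ ((myJoin (q :: (u :: us).dropLast)).length : Int) + 1 = -1 := by omega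
      simp only [if_neg h1, if_neg h2]
      have hdl : (q :: u :: us : List (List Char)).dropLast = q :: (u :: us).dropLast := by
        simp [List.dropLast_cons_of_ne_nil]
      rw [if_neg (by simp : ¬ (q :: u :: us : List (List Char)) = []), hdl,
        myJoin_cons_cons]
      simp

theorem map_dotSlash_free (p : List Char) (hfree : '.' ∉ p) : p.map dotSlash = p := by
  induction p with
  | nil => simp
  | cons c p ih =>
    have hc : c ≠ '.' := fun h => hfree (by simp [h])
    have hf : '.' ∉ p := fun h => hfree (by simp [h])
    simp [dotSlash, hc, ih hf]

theorem map_dotSlash_myJoin (ps : List (List Char)) (hfree : ∀ p ∈ ps, '.' ∉ p) :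
    (myJoin ps).map dotSlash = myJoinS ps := by
  induction ps with
  | nil => simp [myJoin, myJoinS]
  | cons p ps ih =>
    cases ps with
    | nil =>
      simp only [myJoin, myJoinS]
      exact map_dotSlash_free p (hfree p (by simp))
    | cons q qs =>
      rw [myJoin_cons_cons]
      simp only [myJoinS, List.map_append, List.map_cons]
      rw [map_dotSlash_free p (hfree p (by simp)),
        ih (fun r hr => hfree r (List.mem_cons_of_mem _ hr))]
      simp [dotSlash]

theorem join_slash_eq_myJoinS (ps : List (List Char)) :
    PySem.Chars.join ['/'] ps = myJoinS ps := by
  induction ps with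
  | nil => simp [PySem.Chars.join, List.intercalate, myJoinS]
  | cons p ps ih =>
    cases ps with
    | nil => simp [PySem.Chars.join, List.intercalate, myJoinS]
    | cons q qs =>
      simp only [myJoinS]
      rw [← ih]
      simp [PySem.Chars.join, List.intercalate, List.intersperse]

theorem myJoin_snoc (init : List (List Char)) (last : List Char) (h : init ≠ []) :
    myJoin (init ++ [last]) = myJoin init ++ '.' :: last := by
  induction init with
  | nil => simp at h
  | cons p ps ih =>
    cases ps with
    | nil => simp [myJoin]
    | cons q qs =>
      have h2 : myJoin (q :: (qs ++ [last])) = myJoin (q :: qs) ++ '.' :: last := by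
        simpa using ih (by simp)
      rw [show (p :: q :: qs : List (List Char)) ++ [last] = p :: q :: (qs ++ [last]) from rfl,
        myJoin_cons_cons, myJoin_cons_cons, h2]
      simp

-- ---- small indexing/slicing helpers ----
theorem pyGet?_snoc_neg_one {α : Type} (xs : List α) (x : α) :
    PySem.List.pyGet? (xs ++ [x]) (-1) = some x := by
  simp [PySem.List.pyGet?, PySem.List.pyIdx?]

theorem slice_neg_one {α : Type} (xs : List α) :
    PySem.List.slice xs none (some (-1)) = xs.dropLast := by
  simp [PySem.List.slice, List.dropLast_eq_take]

theorem drop_concat_left (p l : List Char) (c : Char) :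
    (p ++ c :: l).drop (p.length + 1) = l := by
  have : p ++ c :: l = (p ++ [c]) ++ l := by simp
  rw [this, show p.length + 1 = (p ++ [c]).length by simp, List.drop_left]

-- ---- the per-string equivalence ----
set_option maxHeartbeats 2000000 in
theorem shorten_eq (path : String) : convertOneA path = shortenB path := by
  have hdotL : (("." : String)).toList = ['.'] := rfl
  set s := PySem.Str.strip path with hs
  set cs := s.toList with hcs
  have hfreeAll : ∀ p ∈ mySplit cs, '.' ∉ p := dotFree_mySplit cs
  have hjoin : myJoin (mySplit cs) = cs := myJoin_mySplit cs
  have hsplit : PySem.Str.split? s "." = some ((mySplit cs).map String.ofList) := by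
    simp [PySem.Str.split?, PySem.Chars.split?, hdotL, splitOn_eq_mySplit, hcs]
  have hcount : PySem.Str.count s "." = (mySplit cs).length - 1 := by
    rw [PySem.Str.count, hdotL, ← hcs, count_eq_count]
    conv_lhs => rw [← hjoin]
    exact count_myJoin _ (mySplit_ne_nil cs) hfreeAll
  have hlenpos : 1 ≤ (mySplit cs).length := by
    cases hms : mySplit cs with
    | nil => exact absurd hms (mySplit_ne_nil cs)
    | cons a b => simp
  by_cases hlen : (mySplit cs).length < 3
  · -- both return the original path
    have hA : convertOneA path = path := by
      simp only [convertOneA]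
      rw [← hs, hsplit]
      simp [hlen]
    have hB : shortenB path = path := by
      simp only [shortenB]
      rw [← hs, hcount]
      have : (mySplit cs).length - 1 < 2 := by omega
      simp [this]
    rw [hA, hB]
  · -- at least three parts
    obtain ⟨p0, p1, r0, rs, hms⟩ :
        ∃ p0 p1 r0 rs, mySplit cs = p0 :: p1 :: r0 :: rs := by
      match hx : mySplit cs with
      | [] => exact absurd hx (mySplit_ne_nil cs)
      | [a] => rw [hx] at hlen; simp at hlen
      | [a, b] => rw [hx] at hlen; simp at hlen
      | a :: b :: c :: l => exact ⟨a, b, c, l, rfl⟩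
    have hfree1 : '.' ∉ p1 := hfreeAll p1 (by rw [hms]; exact List.mem_cons_of_mem _ List.mem_cons_self)
    have hfreeR : ∀ r ∈ r0 :: rs, '.' ∉ r := fun r hr =>
      hfreeAll r (by
        rw [hms]
        exact List.mem_cons_of_mem _ (List.mem_cons_of_mem _ hr))
    have hcs1 : cs = p0 ++ '.' :: myJoin (p1 :: r0 :: rs) := by
      rw [← hjoin, hms, myJoin_cons_cons]
    have ht1 : myJoin (p1 :: r0 :: rs) = p1 ++ '.' :: myJoin (r0 :: rs) := by
      rw [myJoin_cons_cons]
    -- B's intermediate values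
    have hfind : PySem.Str.find s "." = (p0.length : Int) := by
      rw [PySem.Str.find, hdotL, ← hcs, find_eq_myFind, ← hjoin, hms,
        myFind_myJoin p0 _ (by rw [← hms]; exact hfreeAll)]
      simp
    have hk1 : p0.length + 1 ≤ cs.length := by
      rw [hcs1]; simp
    have hdrop1 : cs.drop (p0.length + 1) = myJoin (p1 :: r0 :: rs) := by
      rw [hcs1, drop_concat_left]
    have hfindFrom :
        PySem.Str.findFrom s "." ((p0.length : Int) + 1) none
          = ((p0.length + 1 + p1.length : Nat) : Int) := by
      rw [PySem.Str.findFrom, hdotL, ← hcs]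
      have hcast : ((p0.length : Int) + 1) = ((p0.length + 1 : Nat) : Int) := by push_cast; ring
      rw [hcast, PySem.Chars.findFrom_natCast cs ['.'] (p0.length + 1) hk1, hdrop1]
      rw [find_eq_myFind, ht1, myFind_append_free p1 _ hfree1]
      have h0 : myFind ('.' :: myJoin (r0 :: rs)) = 0 := by simp [myFind]
      rw [h0]
      have e1 : (if (0:Int) = -1 then (-1:Int) else (p1.length : Int) + 0) = (p1.length : Int) := by
        norm_num
      rw [e1]
      have e2 : ¬ ((p1.length : Int) = -1) := by
        have := Int.natCast_nonneg p1.length; omega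
      rw [if_neg e2]
      push_cast
      ring
    have hdrop2 : cs.drop (p0.length + 1 + p1.length + 1) = myJoin (r0 :: rs) := by
      have h1 : (cs.drop (p0.length + 1)).drop (p1.length + 1) = myJoin (r0 :: rs) := by
        rw [hdrop1, ht1, drop_concat_left]
      rw [List.drop_drop] at h1
      rw [show p0.length + 1 + p1.length + 1 = p0.length + 1 + (p1.length + 1) from by ring]
      exact h1
    have htail : (PySem.Str.slice s (some (((p0.length + 1 + p1.length : Nat) : Int) + 1)) none).toList
        = myJoin (r0 :: rs) := by
      rw [PySem.Str.slice, String.toList_ofList, PySem.Chars.slice_eq_listSlice, ← hcs]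
      have hcast : (((p0.length + 1 + p1.length : Nat) : Int) + 1)
          = ((p0.length + 1 + p1.length + 1 : Nat) : Int) := by push_cast; ring
      rw [hcast, PySem.List.slice_from cs (by positivity)]
      rw [Int.toNat_natCast]
      exact hdrop2
    -- A's intermediate values
    have hAparts : (PySem.Str.split? s ".").getD [] = (mySplit cs).map String.ofList := by
      rw [hsplit]; rfl
    have hAlen : ¬ ((mySplit cs).map String.ofList).length < 3 := by
      simpa using hlen
    have hAslice : PySem.List.slice ((mySplit cs).map String.ofList) (some 2) none
        = (r0 :: rs).map String.ofList := by
      rw [PySem.List.slice_from _ (by norm_num), hms]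
      rfl
    have hBcount : ¬ PySem.Str.count s "." < 2 := by
      rw [hcount, hms]; simp
    -- rfind on the tail
    have hrfind : PySem.Chars.rfind (myJoin (r0 :: rs)) ['.']
        = if rs = [] then -1 else ((myJoin (r0 :: rs.dropLast)).length : Int) := by
      rw [rfind_eq_myRfind]
      exact myRfind_myJoin r0 rs hfreeR
    cases hrs : rs with
    | nil =>
      -- single remaining part: A returns it as-is, B's tail has no dot
      subst hrs
      have hA : convertOneA path = String.ofList r0 := by
        simp only [convertOneA]
        rw [← hs, hAparts]
        rw [if_neg hAlen, hAslice]
        simp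
      have hB : shortenB path = String.ofList r0 := by
        simp only [shortenB]
        rw [← hs]
        rw [if_neg hBcount, hfind, hfindFrom]
        have hkeq : PySem.Str.rfind (PySem.Str.slice s (some (((p0.length + 1 + p1.length : Nat) : Int) + 1)) none) "." = -1 := by
          rw [PySem.Str.rfind, hdotL, htail, hrfind]
          simp
        rw [hkeq, if_pos (rfl : (-1:Int) = -1)]
        apply String.toList_inj.mp
        rw [htail, String.toList_ofList]
        simp [myJoin]
      rw [hA, hB]
    | cons u us =>
      subst hrs
      set rs := u :: us with hrsdef
      have hrsne : rs ≠ [] := by simp [hrsdef]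
      set init : List (List Char) := r0 :: rs.dropLast with hinit
      set last : List Char := rs.getLast hrsne with hlast
      have hinitne : init ≠ [] := by simp [hinit]
      have hsnoc : init ++ [last] = r0 :: rs := by
        rw [hinit, hlast]
        rw [show (r0 :: rs.dropLast) ++ [rs.getLast hrsne] = r0 :: (rs.dropLast ++ [rs.getLast hrsne]) from rfl]
        rw [List.dropLast_append_getLast hrsne]
      have hfreeInit : ∀ r ∈ init, '.' ∉ r := by
        intro r hr
        apply hfreeR
        rw [← hsnoc]
        exact List.mem_append_left _ hr
      have ht2 : myJoin (r0 :: rs) = myJoin init ++ '.' :: last := by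
        rw [← hsnoc, myJoin_snoc init last hinitne]
      have hkval : PySem.Chars.rfind (myJoin (r0 :: rs)) ['.']
          = ((myJoin init).length : Int) := by
        rw [hrfind, if_neg hrsne]
      have hkne : ((myJoin init).length : Int) ≠ -1 := by
        have := Int.natCast_nonneg (myJoin init).length; omega
      -- A's value
      have hA : (convertOneA path).toList = myJoinS init ++ '.' :: last := by
        simp only [convertOneA]
        rw [← hs, hAparts]
        rw [if_neg hAlen, hAslice]
        have hlen2 : ¬ ((r0 :: rs).map String.ofList).length = 1 := by
          simp [hrsdef]
        rw [if_neg hlen2]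
        have hmapsnoc : (r0 :: rs).map String.ofList
            = (init.map String.ofList) ++ [String.ofList last] := by
          rw [← hsnoc]; simp
        rw [hmapsnoc, slice_neg_one, pyGet?_snoc_neg_one]
        rw [List.dropLast_concat]
        rw [String.toList_append, String.toList_append]
        rw [PySem.Str.toList_join, Option.getD_some, String.toList_ofList]
        rw [List.map_map]
        have : (String.toList ∘ String.ofList) = id := by
          funext l; simp
        rw [this, List.map_id, hdotL, join_slash_eq_myJoinS]
        simp
      -- B's value
      have hB : (shortenB path).toList = myJoinS init ++ '.' :: last := by
        simp only [shortenB]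
        rw [← hs]
        rw [if_neg hBcount, hfind, hfindFrom]
        have hkeq : PySem.Str.rfind (PySem.Str.slice s (some (((p0.length + 1 + p1.length : Nat) : Int) + 1)) none) "." = ((myJoin init).length : Int) := by
          rw [PySem.Str.rfind, hdotL, htail, hkval]
        rw [hkeq, if_neg hkne]
        rw [String.toList_append, PySem.Str.toList_replace, hdotL]
        have hslice1 : (PySem.Str.slice (PySem.Str.slice s (some (((p0.length + 1 + p1.length : Nat) : Int) + 1)) none) none (some ((myJoin init).length : Int))).toList
            = myJoin init := by
          rw [PySem.Str.slice, String.toList_ofList, PySem.Chars.slice_eq_listSlice, htail]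
          rw [PySem.List.slice_to _ (by positivity), Int.toNat_natCast, ht2]
          exact List.take_left ..
        have hslice2 : (PySem.Str.slice (PySem.Str.slice s (some (((p0.length + 1 + p1.length : Nat) : Int) + 1)) none) (some ((myJoin init).length : Int)) none).toList
            = '.' :: last := by
          rw [PySem.Str.slice, String.toList_ofList, PySem.Chars.slice_eq_listSlice, htail]
          rw [PySem.List.slice_from _ (by positivity), Int.toNat_natCast, ht2]
          exact List.drop_left ..
        rw [hslice1, hslice2]
        rw [show (("/" : String)).toList = ['/'] from rfl]
        rw [replace_eq_map, map_dotSlash_myJoin init hfreeInit]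
      apply String.toList_inj.mp
      rw [hA, hB]

theorem convert_paths_eq (paths : List String) :
    convert_paths paths = convert_paths_alt paths := by
  rw [convert_paths, convert_paths_alt, PySem.List.foldl_append_singleton_eq_map]
  simp only [List.nil_append]
  exact List.map_congr_left (fun p _ => shorten_eq p)

-- ===== VERDICT (by name: the statement is the Claim_ definition above) =====
theorem convert_paths_spec : Claim_equal_convert_paths := by
  intro paths _
  unfold Spec_convert_paths
  exact convert_paths_eq paths
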